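-- pv_equiv track=rewrite | github.com/Agentic-governance/logistics-mcp | pipeline/tourism/effective_distance_client.py | _equipment_seats
-- ===== SOURCE A (Python) =====
-- AIRCRAFT_SEATS = {
--     "B777": 360, "777": 360,
--     "B787": 280, "787": 280,
--     "A380": 500, "380": 500,
--     "A350": 310, "350": 310,
--     "A330": 270, "330": 270,
--     "B767": 220, "767": 220,
--     "A321": 185, "321": 185,
--     "B737": 160, "737": 160,
--     "A320": 150, "320": 150,
--     "B747": 410, "747": 410,
--     "A340": 280, "340": 280,
--     "E190": 100, "E90": 100,
--     "DEFAULT": 180,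
-- }
--
-- def _equipment_seats(equipment_str: str) -> int:
--     """機材文字列から座席数を推定"""
--     if not equipment_str:
--         return AIRCRAFT_SEATS["DEFAULT"]
--     tokens = equipment_str.replace("/", " ").split()
--     for token in tokens:
--         t = token.upper().strip()
--         if t in AIRCRAFT_SEATS:
--             return AIRCRAFT_SEATS[t]
--         for key, seats in AIRCRAFT_SEATS.items():
--             if key != "DEFAULT" and t.startswith(key[:2]) and len(t) >= 2:
--                 return seats
--     return AIRCRAFT_SEATS["DEFAULT"]
-- ===== SOURCE B (Python) =====
-- AIRCRAFT_SEATS = {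
--     "B777": 360, "777": 360,
--     "B787": 280, "787": 280,
--     "A380": 500, "380": 500,
--     "A350": 310, "350": 310,
--     "A330": 270, "330": 270,
--     "B767": 220, "767": 220,
--     "A321": 185, "321": 185,
--     "B737": 160, "737": 160,
--     "A320": 150, "320": 150,
--     "B747": 410, "747": 410,
--     "A340": 280, "340": 280,
--     "E190": 100, "E90": 100,
--     "DEFAULT": 180,
-- }
--
-- # Index built once: two-char key prefix -> seat count, first occurrence wins.
-- PREFIX_MAP = {}
-- for _key, _seats in AIRCRAFT_SEATS.items():
--     if _key != "DEFAULT":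
--         PREFIX_MAP.setdefault(_key[:2], _seats)
--
--
-- def _equipment_seats(equipment_str: str) -> int:
--     """機材文字列から座席数を推定"""
--     if not equipment_str:
--         return AIRCRAFT_SEATS["DEFAULT"]
--     for token in equipment_str.replace("/", " ").split():
--         t = token.upper().strip()
--         if t in AIRCRAFT_SEATS:
--             return AIRCRAFT_SEATS[t]
--         if len(t) >= 2 and t[:2] in PREFIX_MAP:
--             return PREFIX_MAP[t[:2]]
--     return AIRCRAFT_SEATS["DEFAULT"]
-- ===== Notes on version B (the rewrite author's own statement) =====
-- stated objective: simpler
-- what changed: B precomputes once a first-occurrence prefix index (two-char key prefix -> seats), so the per-token inner rescan of the whole aircraft dict disappears: each token is one exact lookup plus one prefix-index lookup.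
import Mathlib
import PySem

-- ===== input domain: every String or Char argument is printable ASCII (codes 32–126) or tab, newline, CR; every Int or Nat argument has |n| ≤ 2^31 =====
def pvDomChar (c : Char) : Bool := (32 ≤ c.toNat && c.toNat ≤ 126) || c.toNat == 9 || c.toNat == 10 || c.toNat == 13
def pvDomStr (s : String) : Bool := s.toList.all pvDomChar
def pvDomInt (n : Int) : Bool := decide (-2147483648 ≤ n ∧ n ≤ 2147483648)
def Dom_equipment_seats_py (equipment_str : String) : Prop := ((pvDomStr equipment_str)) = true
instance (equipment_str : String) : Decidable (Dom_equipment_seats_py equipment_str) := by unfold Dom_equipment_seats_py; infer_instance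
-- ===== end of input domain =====

-- B replaces A's per-token rescan of the whole aircraft dict by a prefix index built once (simpler per-token logic).


-- ===== PORT A =====
def pvSeatsItems : List (String × Int) :=
  [("B777",360),("777",360),("B787",280),("787",280),("A380",500),("380",500),
   ("A350",310),("350",310),("A330",270),("330",270),("B767",220),("767",220),
   ("A321",185),("321",185),("B737",160),("737",160),("A320",150),("320",150),
   ("B747",410),("747",410),("A340",280),("340",280),("E190",100),("E90",100),
   ("DEFAULT",180)]

def pvAircraftSeats : PySem.Dict String Int := PySem.Dict.ofList pvSeatsItems

-- the inner 'for key, seats in AIRCRAFT_SEATS.items()' scan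
def pvScanA (t : String) : List (String × Int) → Option Int
  | [] => none
  | (key, seats) :: rest =>
    if key ≠ "DEFAULT" ∧ PySem.Str.startswith t (PySem.Str.slice key none (some 2)) = true ∧ 2 ≤ PySem.Str.len t
    then some seats else pvScanA t rest

-- the outer 'for token in tokens' loop (some = early return)
def pvLoopA : List String → Option Int
  | [] => none
  | token :: rest =>
    let t := PySem.Str.strip (PySem.Str.upper token)
    if pvAircraftSeats.contains t = true then pvAircraftSeats.get? t
    else match pvScanA t pvAircraftSeats.items with
      | some v => some v
      | none => pvLoopA rest

def equipment_seats_py (equipment_str : String) : Int :=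
  if PySem.Str.len equipment_str = 0 then (pvAircraftSeats.get? "DEFAULT").getD 0
  else match pvLoopA (PySem.Str.split₀ (PySem.Str.replace equipment_str "/" " ")) with
    | some v => v
    | none => (pvAircraftSeats.get? "DEFAULT").getD 0

-- ===== PORT B =====
-- PREFIX_MAP = {}; for key, seats in AIRCRAFT_SEATS.items(): if key != "DEFAULT": PREFIX_MAP.setdefault(key[:2], seats)
def pvPrefixMap : PySem.Dict String Int :=
  pvSeatsItems.foldl
    (fun d kv => if kv.1 ≠ "DEFAULT" then d.setdefault (PySem.Str.slice kv.1 none (some 2)) kv.2 else d)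
    PySem.Dict.empty

def pvLoopB : List String → Option Int
  | [] => none
  | token :: rest =>
    let t := PySem.Str.strip (PySem.Str.upper token)
    if pvAircraftSeats.contains t = true then pvAircraftSeats.get? t
    else if 2 ≤ PySem.Str.len t ∧ pvPrefixMap.contains (PySem.Str.slice t none (some 2)) = true
      then pvPrefixMap.get? (PySem.Str.slice t none (some 2))
      else pvLoopB rest

def equipment_seats_py_alt (equipment_str : String) : Int :=
  if PySem.Str.len equipment_str = 0 then (pvAircraftSeats.get? "DEFAULT").getD 0
  else match pvLoopB (PySem.Str.split₀ (PySem.Str.replace equipment_str "/" " ")) with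
    | some v => v
    | none => (pvAircraftSeats.get? "DEFAULT").getD 0

-- ===== PRECONDITION & SPEC =====
def Spec_equipment_seats_py (equipment_str : String) (out : Int) : Prop := out = equipment_seats_py_alt equipment_str
instance (equipment_str : String) (out : Int) : Decidable (Spec_equipment_seats_py equipment_str out) := by unfold Spec_equipment_seats_py; infer_instance

-- ===== CLAIM (what is proved, stated in full; the proofs are below) =====
def Claim_equal_equipment_seats_py : Prop := ∀ (equipment_str : String), Dom_equipment_seats_py equipment_str → Spec_equipment_seats_py equipment_str (equipment_seats_py equipment_str)

-- ===== LEMMAS AND PROOFS =====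

theorem pv_sw (p t : String) (hp : p.toList.length = 2) :
    (PySem.Str.startswith t p = true) ↔ (p = PySem.Str.slice t none (some 2)) := by
  rw [PySem.Str.startswith_eq, PySem.Chars.startswith_iff, List.prefix_iff_eq_take, hp,
    ← String.toList_inj, PySem.Str.toList_slice, PySem.Chars.slice_eq_listSlice]
  have : PySem.List.slice t.toList none (some 2) = t.toList.take 2 := by simp [pysem]
  rw [this]

set_option maxHeartbeats 1000000 in
theorem pv_scan_eq (t : String) :
    pvScanA t pvAircraftSeats.items =
      (if 2 ≤ PySem.Str.len t then pvPrefixMap.get? (PySem.Str.slice t none (some 2)) else none) := by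
  have hpm : pvPrefixMap = PySem.Dict.mk [("B7",360),("77",360),("78",280),("A3",500),("38",500),("35",310),("33",270),("76",220),("32",185),("73",160),("74",410),("34",280),("E1",100),("E9",100)] := by decide
  rw [show pvAircraftSeats.items = pvSeatsItems from rfl, hpm]
  have eB777 : PySem.Str.slice "B777" none (some 2) = "B7" := by decide
  have e777 : PySem.Str.slice "777" none (some 2) = "77" := by decide
  have eB787 : PySem.Str.slice "B787" none (some 2) = "B7" := by decide
  have e787 : PySem.Str.slice "787" none (some 2) = "78" := by decide
  have eA380 : PySem.Str.slice "A380" none (some 2) = "A3" := by decide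
  have e380 : PySem.Str.slice "380" none (some 2) = "38" := by decide
  have eA350 : PySem.Str.slice "A350" none (some 2) = "A3" := by decide
  have e350 : PySem.Str.slice "350" none (some 2) = "35" := by decide
  have eA330 : PySem.Str.slice "A330" none (some 2) = "A3" := by decide
  have e330 : PySem.Str.slice "330" none (some 2) = "33" := by decide
  have eB767 : PySem.Str.slice "B767" none (some 2) = "B7" := by decide
  have e767 : PySem.Str.slice "767" none (some 2) = "76" := by decide
  have eA321 : PySem.Str.slice "A321" none (some 2) = "A3" := by decide
  have e321 : PySem.Str.slice "321" none (some 2) = "32" := by decide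
  have eB737 : PySem.Str.slice "B737" none (some 2) = "B7" := by decide
  have e737 : PySem.Str.slice "737" none (some 2) = "73" := by decide
  have eA320 : PySem.Str.slice "A320" none (some 2) = "A3" := by decide
  have e320 : PySem.Str.slice "320" none (some 2) = "32" := by decide
  have eB747 : PySem.Str.slice "B747" none (some 2) = "B7" := by decide
  have e747 : PySem.Str.slice "747" none (some 2) = "74" := by decide
  have eA340 : PySem.Str.slice "A340" none (some 2) = "A3" := by decide
  have e340 : PySem.Str.slice "340" none (some 2) = "34" := by decide
  have eE190 : PySem.Str.slice "E190" none (some 2) = "E1" := by decide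
  have eE90 : PySem.Str.slice "E90" none (some 2) = "E9" := by decide
  by_cases h2 : 2 ≤ PySem.Str.len t
  · rw [if_pos h2]
    simp only [pvScanA, pvSeatsItems, PySem.Dict.get?_mk_cons,
      eB777, e777, eB787, e787, eA380, e380, eA350, e350, eA330, e330, eB767, e767,
      eA321, e321, eB737, e737, eA320, e320, eB747, e747, eA340, e340, eE190, eE90,
      pv_sw "B7" t (by decide), pv_sw "77" t (by decide), pv_sw "78" t (by decide), pv_sw "A3" t (by decide), pv_sw "38" t (by decide), pv_sw "35" t (by decide), pv_sw "33" t (by decide), pv_sw "76" t (by decide), pv_sw "32" t (by decide), pv_sw "73" t (by decide), pv_sw "74" t (by decide), pv_sw "34" t (by decide), pv_sw "E1" t (by decide), pv_sw "E9" t (by decide), h2, beq_iff_eq, ne_eq, and_true, true_and,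
      String.reduceEq, not_false_eq_true]
    generalize PySem.Str.slice t none (some 2) = u
    clear hpm eB777 e777 eB787 e787 eA380 e380 eA350 e350 eA330 e330 eB767 e767 eA321 e321 eB737 e737 eA320 e320 eB747 e747 eA340 e340 eE190 eE90 h2
    simp only [not_true, false_and, if_false,
      show (PySem.Dict.mk ([] : List (String × Int))).get? u = none from rfl]
    by_cases h1 : "B7" = u
    · simp [h1]
    by_cases h2 : "77" = u
    · simp [h1, h2]
    by_cases h3 : "78" = u
    · simp [h1, h2, h3]
    by_cases h4 : "A3" = u
    · simp [h1, h2, h3, h4]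
    by_cases h5 : "38" = u
    · simp [h1, h2, h3, h4, h5]
    by_cases h6 : "35" = u
    · simp [h1, h2, h3, h4, h5, h6]
    by_cases h7 : "33" = u
    · simp [h1, h2, h3, h4, h5, h6, h7]
    by_cases h8 : "76" = u
    · simp [h1, h2, h3, h4, h5, h6, h7, h8]
    by_cases h9 : "32" = u
    · simp [h1, h2, h3, h4, h5, h6, h7, h8, h9]
    by_cases h10 : "73" = u
    · simp [h1, h2, h3, h4, h5, h6, h7, h8, h9, h10]
    by_cases h11 : "74" = u
    · simp [h1, h2, h3, h4, h5, h6, h7, h8, h9, h10, h11]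
    by_cases h12 : "34" = u
    · simp [h1, h2, h3, h4, h5, h6, h7, h8, h9, h10, h11, h12]
    by_cases h13 : "E1" = u
    · simp [h1, h2, h3, h4, h5, h6, h7, h8, h9, h10, h11, h12, h13]
    by_cases h14 : "E9" = u
    · simp [h1, h2, h3, h4, h5, h6, h7, h8, h9, h10, h11, h12, h13, h14]
    simp [h1, h2, h3, h4, h5, h6, h7, h8, h9, h10, h11, h12, h13, h14]
  · rw [if_neg h2]
    simp only [pvScanA, pvSeatsItems, h2, and_false, if_false]

theorem pv_loop_eq (ts : List String) : pvLoopA ts = pvLoopB ts := by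
  induction ts with
  | nil => rfl
  | cons token rest ih =>
    simp only [pvLoopA, pvLoopB]
    rw [pv_scan_eq]
    by_cases hc : pvAircraftSeats.contains (PySem.Str.strip (PySem.Str.upper token)) = true
    · simp [hc]
    · rw [if_neg hc, if_neg hc]
      rcases hG : pvPrefixMap.get? (PySem.Str.slice (PySem.Str.strip (PySem.Str.upper token)) none (some 2)) with _ | v
      · have hp : pvPrefixMap.contains (PySem.Str.slice (PySem.Str.strip (PySem.Str.upper token)) none (some 2)) = false := by
          rw [PySem.Dict.contains_eq_isSome_get?, hG]; rfl
        simp [hp, ih]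
      · have hp : pvPrefixMap.contains (PySem.Str.slice (PySem.Str.strip (PySem.Str.upper token)) none (some 2)) = true := by
          rw [PySem.Dict.contains_eq_isSome_get?, hG]; rfl
        simp only [hp, and_true]
        split_ifs <;> simp [ih]

-- ===== VERDICT (by name: the statement is the Claim_ definition above) =====
theorem equipment_seats_py_spec : Claim_equal_equipment_seats_py := by
  intro s _
  unfold Spec_equipment_seats_py equipment_seats_py equipment_seats_py_alt
  rw [pv_loop_eq]
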